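-- pv_equiv track=rewrite | github.com/manwar/perlweeklychallenge-club | challenge-357/roger-bell-west/python/ch-2.py | uniquefractiongenerator
-- ===== SOURCE A (Python) =====
-- from math import gcd
--
-- def uniquefractiongenerator(a):
--   den = 1
--   for dn in range(2, a + 1):
--     den *= dn
--   f = set()
--   for d in range(1, a + 1):
--     nd = den // d
--     for n in range(1, a + 1):
--       f.add(n * nd)
--   out = []
--   ff = list(f)
--   ff.sort()
--   for n in ff:
--     g = gcd(n, den)
--     nn = n // g
--     nd = den // g
--     out.append(str(nn) + "/" + str(nd))
--   return out
-- ===== SOURCE B (Python) =====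
-- from math import gcd
--
-- def uniquefractiongenerator(a):
--   fr = set()
--   for d in range(1, a + 1):
--     for n in range(1, a + 1):
--       g = gcd(n, d)
--       fr.add((n // g, d // g))
--   aa = a * a
--   out = []
--   for n, d in sorted(fr, key=lambda p: (p[0] * aa) // p[1]):
--     out.append(str(n) + "/" + str(d))
--   return out
-- ===== Notes on version B (the rewrite author's own statement) =====
-- stated objective: faster
-- what changed: Instead of scaling every fraction by the factorial of a (huge big-int arithmetic) and reducing after deduplication, B reduces each fraction by its small gcd first, dedupes the reduced (numerator,denominator) pairs in a set, and sorts them by the exact small integer key (n*a*a)//d; intended as faster (measured 3.1x at the largest size both finish).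
import Mathlib
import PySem

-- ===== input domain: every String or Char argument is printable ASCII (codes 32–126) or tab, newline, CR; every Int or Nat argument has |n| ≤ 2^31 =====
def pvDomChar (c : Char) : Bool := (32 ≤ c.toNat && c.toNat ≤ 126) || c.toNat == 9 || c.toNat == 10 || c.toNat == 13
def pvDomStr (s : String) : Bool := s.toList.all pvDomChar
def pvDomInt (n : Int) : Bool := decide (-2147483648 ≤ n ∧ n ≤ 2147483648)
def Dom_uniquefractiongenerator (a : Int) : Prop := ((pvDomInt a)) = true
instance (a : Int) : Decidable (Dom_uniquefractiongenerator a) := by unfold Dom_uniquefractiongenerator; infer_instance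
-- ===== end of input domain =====

-- B replaces A's factorial-scaled big integers by gcd-reduced pairs sorted with a small exact key (intended as faster; measured 3.1x at the largest size both finished).

-- ===== PORT A =====
-- math.gcd(x, y) = Int.gcd x y : exact (gcd of absolute values, nonnegative).
def uniquefractiongenerator (a : Int) : List String :=
  let den := (PySem.List.pyRange 2 (a + 1)).foldl (fun den dn => den * dn) 1
  let f : PySem.Set Int := (PySem.List.pyRange 1 (a + 1)).foldl (fun f d =>
      let nd := PySem.Int.floordiv den d
      (PySem.List.pyRange 1 (a + 1)).foldl (fun f n => PySem.Set.add f (n * nd)) f)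
    PySem.Set.empty
  -- ff = list(f); ff.sort(): the ints are distinct, so sorting is order-independent
  let ff := PySem.List.sorted f (fun x => x)
  ff.foldl (fun out n =>
      let g : Int := Int.gcd n den
      out ++ [PySem.Int.toStr (PySem.Int.floordiv n g) ++ "/" ++ PySem.Int.toStr (PySem.Int.floordiv den g)]) []

-- ===== PORT B =====
-- math.gcd(n, d) = Int.gcd n d : exact (gcd of absolute values, nonnegative).
def uniquefractiongenerator_alt (a : Int) : List String :=
  let fr : PySem.Set (Int × Int) := (PySem.List.pyRange 1 (a + 1)).foldl (fun fr d =>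
      (PySem.List.pyRange 1 (a + 1)).foldl (fun fr n =>
        let g : Int := Int.gcd n d
        PySem.Set.add fr (PySem.Int.floordiv n g, PySem.Int.floordiv d g)) fr)
    PySem.Set.empty
  let aa := a * a
  -- sorted(fr, key=…): the keys are pairwise distinct on fr, so the result is order-independent
  (PySem.List.sorted fr (fun p => PySem.Int.floordiv (p.1 * aa) p.2)).foldl
    (fun out p => out ++ [PySem.Int.toStr p.1 ++ "/" ++ PySem.Int.toStr p.2]) []

-- ===== PRECONDITION & SPEC =====
def Spec_uniquefractiongenerator (a : Int) (out : List String) : Prop := out = uniquefractiongenerator_alt a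
instance (a : Int) (out : List String) : Decidable (Spec_uniquefractiongenerator a out) := by unfold Spec_uniquefractiongenerator; infer_instance

-- ===== CLAIM (what is proved, stated in full; the proofs are below) =====
def Claim_equal_uniquefractiongenerator : Prop := ∀ (a : Int), Dom_uniquefractiongenerator a → Spec_uniquefractiongenerator a (uniquefractiongenerator a)

-- ===== LEMMAS AND PROOFS =====

-- proof-only abbreviations for the pieces of the two ports
def denP (a : Int) : Int := (PySem.List.pyRange 2 (a + 1)).foldl (fun den dn => den * dn) 1

def fA (a : Int) : PySem.Set Int := (PySem.List.pyRange 1 (a + 1)).foldl (fun f d =>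
    (PySem.List.pyRange 1 (a + 1)).foldl (fun f n => PySem.Set.add f (n * PySem.Int.floordiv (denP a) d)) f)
  PySem.Set.empty

def frB (a : Int) : PySem.Set (Int × Int) := (PySem.List.pyRange 1 (a + 1)).foldl (fun fr d =>
    (PySem.List.pyRange 1 (a + 1)).foldl (fun fr n =>
      PySem.Set.add fr (PySem.Int.floordiv n (Int.gcd n d), PySem.Int.floordiv d (Int.gcd n d))) fr)
  PySem.Set.empty

def fmtB (p : Int × Int) : String := PySem.Int.toStr p.1 ++ "/" ++ PySem.Int.toStr p.2

-- reduce v/den to lowest terms, as A's output loop does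
def phi (den v : Int) : Int × Int :=
  (PySem.Int.floordiv v (Int.gcd v den), PySem.Int.floordiv den (Int.gcd v den))

lemma portA_eq (a : Int) : uniquefractiongenerator a =
    (PySem.List.sorted (fA a) (fun x => x)).map (fun v => fmtB (phi (denP a) v)) := by
  simp only [uniquefractiongenerator, fA, denP, phi, fmtB, PySem.List.foldl_append_singleton_eq_map,
    List.nil_append]

lemma portB_eq (a : Int) : uniquefractiongenerator_alt a =
    (PySem.List.sorted (frB a) (fun p => PySem.Int.floordiv (p.1 * (a * a)) p.2)).map fmtB := by
  simp only [uniquefractiongenerator_alt, frB, PySem.List.foldl_append_singleton_eq_map,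
    List.nil_append]
  rfl

lemma foldl_mul_pos (l : List Int) : ∀ (s : Int), 0 < s → (∀ x ∈ l, 0 < x) →
    0 < l.foldl (fun den dn => den * dn) s := by
  induction l with
  | nil => intro s hs _; simpa using hs
  | cons x xs ih =>
    intro s hs h
    simp only [List.foldl_cons]
    exact ih _ (mul_pos hs (h x (.head _))) (fun y hy => h y (.tail _ hy))

lemma dvd_foldl_mul (l : List Int) : ∀ (s x : Int), (x ∈ l ∨ x ∣ s) →
    x ∣ l.foldl (fun den dn => den * dn) s := by
  induction l with
  | nil => intro s x h; simpa using h.elim (by simp) id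
  | cons y ys ih =>
    intro s x h
    simp only [List.foldl_cons]
    rcases h with h | h
    · rcases List.mem_cons.mp h with rfl | h
      · exact ih _ _ (Or.inr (dvd_mul_left x s))
      · exact ih _ _ (Or.inl h)
    · exact ih _ _ (Or.inr (h.mul_right y))

lemma denP_pos (a : Int) : 0 < denP a :=
  foldl_mul_pos _ 1 one_pos (fun x hx => by have := (PySem.List.mem_pyRange_one.mp hx).1; omega)

lemma dvd_denP (a : Int) (d : Int) (h1 : 1 ≤ d) (h2 : d ≤ a) : d ∣ denP a := by
  rcases eq_or_lt_of_le h1 with rfl | h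
  · exact one_dvd _
  · exact dvd_foldl_mul _ _ _ (Or.inl (PySem.List.mem_pyRange_one.mpr ⟨by omega, by omega⟩))

lemma mem_foldl_foldl_add {α : Type} [BEq α] [LawfulBEq α] (g : Int → Int → α) (r : List Int)
    (l : List Int) : ∀ (s : PySem.Set α) (y : α),
    (y ∈ l.foldl (fun f d => r.foldl (fun f n => PySem.Set.add f (g d n)) f) s ↔
      y ∈ s ∨ ∃ d ∈ l, ∃ n ∈ r, y = g d n) := by
  induction l with
  | nil => simp
  | cons d ds ih =>
    intro s y
    simp only [List.foldl_cons, ih, PySem.Set.mem_foldl_add, List.mem_cons]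
    constructor
    · rintro ((h | ⟨n, hn, rfl⟩) | ⟨d', hd', n, hn, rfl⟩)
      · exact Or.inl h
      · exact Or.inr ⟨d, Or.inl rfl, n, hn, rfl⟩
      · exact Or.inr ⟨d', Or.inr hd', n, hn, rfl⟩
    · rintro (h | ⟨d', (rfl | hd'), n, hn, rfl⟩)
      · exact Or.inl (Or.inl h)
      · exact Or.inl (Or.inr ⟨n, hn, rfl⟩)
      · exact Or.inr ⟨d', hd', n, hn, rfl⟩

lemma nodup_foldl_foldl_add {α : Type} [BEq α] [LawfulBEq α] (g : Int → Int → α) (r : List Int)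
    (l : List Int) : ∀ (s : PySem.Set α), s.Nodup →
    (l.foldl (fun f d => r.foldl (fun f n => PySem.Set.add f (g d n)) f) s).Nodup := by
  induction l with
  | nil => intro s hs; simpa using hs
  | cons d ds ih =>
    intro s hs
    simp only [List.foldl_cons]
    exact ih _ (by rw [← PySem.Set.update_map_eq_foldl_add]; exact PySem.Set.nodup_update _ _ hs)

lemma mem_fA (a : Int) (v : Int) : v ∈ fA a ↔
    ∃ d, (1 ≤ d ∧ d ≤ a) ∧ ∃ n, (1 ≤ n ∧ n ≤ a) ∧ v = n * PySem.Int.floordiv (denP a) d := by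
  rw [fA, mem_foldl_foldl_add (fun d n => n * PySem.Int.floordiv (denP a) d)]
  simp only [PySem.Set.empty, List.not_mem_nil, false_or, PySem.List.mem_pyRange_one]
  constructor
  · rintro ⟨d, hd, n, hn, rfl⟩; exact ⟨d, ⟨hd.1, by omega⟩, n, ⟨hn.1, by omega⟩, rfl⟩
  · rintro ⟨d, hd, n, hn, rfl⟩; exact ⟨d, ⟨hd.1, by omega⟩, n, ⟨hn.1, by omega⟩, rfl⟩

lemma nodup_fA (a : Int) : (fA a).Nodup :=
  nodup_foldl_foldl_add (fun d n => n * PySem.Int.floordiv (denP a) d) _ _ _ List.nodup_nil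

lemma mem_frB (a : Int) (p : Int × Int) : p ∈ frB a ↔
    ∃ d, (1 ≤ d ∧ d ≤ a) ∧ ∃ n, (1 ≤ n ∧ n ≤ a) ∧
      p = (PySem.Int.floordiv n (Int.gcd n d), PySem.Int.floordiv d (Int.gcd n d)) := by
  rw [frB, mem_foldl_foldl_add
    (fun d n => (PySem.Int.floordiv n (Int.gcd n d), PySem.Int.floordiv d (Int.gcd n d)))]
  simp only [PySem.Set.empty, List.not_mem_nil, false_or, PySem.List.mem_pyRange_one]
  constructor
  · rintro ⟨d, hd, n, hn, rfl⟩; exact ⟨d, ⟨hd.1, by omega⟩, n, ⟨hn.1, by omega⟩, rfl⟩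
  · rintro ⟨d, hd, n, hn, rfl⟩; exact ⟨d, ⟨hd.1, by omega⟩, n, ⟨hn.1, by omega⟩, rfl⟩

lemma nodup_frB (a : Int) : (frB a).Nodup :=
  nodup_foldl_foldl_add
    (fun d n => (PySem.Int.floordiv n (Int.gcd n d), PySem.Int.floordiv d (Int.gcd n d))) _ _ _
    List.nodup_nil

-- the arithmetic core: reducing n*(den/d) against den is reducing n/d
lemma phi_reduce (den n d : Int) (hn : 1 ≤ n) (hd : 1 ≤ d) (hden : 0 < den) (hdvd : d ∣ den) :
    phi den (n * PySem.Int.floordiv den d) =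
      (PySem.Int.floordiv n (Int.gcd n d), PySem.Int.floordiv d (Int.gcd n d)) := by
  rw [phi]
  have hm0 : PySem.Int.floordiv den d = den / d := PySem.Int.floordiv_eq_ediv_of_pos (by omega)
  set m := den / d with hm
  have hdm : d * m = den := Int.mul_ediv_cancel' hdvd
  have hmpos : 0 < m := by nlinarith
  have hg0 : 0 < (Int.gcd n d : Int) := by
    have : ¬(n = 0 ∧ d = 0) := by omega
    have := Int.gcd_eq_zero_iff (a := n) (b := d)
    omega
  have hG : ((n * m).gcd (d * m) : Int) = (Int.gcd n d : Int) * m := by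
    rw [Int.gcd_mul_right]
    push_cast
    rw [abs_of_pos hmpos]
  rw [hm0]
  have hGm : (Int.gcd (n * m) den : Int) = (Int.gcd n d : Int) * m := by
    rw [← hdm]; exact hG
  rw [hGm]
  have hgm : 0 < (Int.gcd n d : Int) * m := by positivity
  rw [PySem.Int.floordiv_eq_ediv_of_pos hgm, PySem.Int.floordiv_eq_ediv_of_pos hgm,
      PySem.Int.floordiv_eq_ediv_of_pos hg0, PySem.Int.floordiv_eq_ediv_of_pos hg0, ← hdm]
  rw [Int.mul_ediv_mul_of_pos_left n _ hmpos, Int.mul_ediv_mul_of_pos_left d _ hmpos]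

-- every element of frB is a positive pair bounded by a whose denominator divides denP
lemma frB_spec (a : Int) (p : Int × Int) (hp : p ∈ frB a) :
    1 ≤ p.1 ∧ p.1 ≤ a ∧ 1 ≤ p.2 ∧ p.2 ≤ a ∧ p.2 ∣ denP a := by
  rcases (mem_frB a p).mp hp with ⟨d, hd, n, hn, rfl⟩
  have hg0 : 0 < (Int.gcd n d : Int) := by
    have : ¬(n = 0 ∧ d = 0) := by omega
    have := Int.gcd_eq_zero_iff (a := n) (b := d)
    omega
  have hgn : (Int.gcd n d : Int) ∣ n := Int.gcd_dvd_left n d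
  have hgd : (Int.gcd n d : Int) ∣ d := Int.gcd_dvd_right n d
  rw [PySem.Int.floordiv_eq_ediv_of_pos hg0, PySem.Int.floordiv_eq_ediv_of_pos hg0]
  have h1 : 1 ≤ n / (Int.gcd n d : Int) := by
    rw [Int.le_ediv_iff_mul_le hg0, one_mul]
    exact Int.le_of_dvd (by omega) hgn
  have h2 : 1 ≤ d / (Int.gcd n d : Int) := by
    rw [Int.le_ediv_iff_mul_le hg0, one_mul]
    exact Int.le_of_dvd (by omega) hgd
  have h3 : n / (Int.gcd n d : Int) ≤ n := Int.ediv_le_self _ (by omega)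
  have h4 : d / (Int.gcd n d : Int) ≤ d := Int.ediv_le_self _ (by omega)
  have h5 : d / (Int.gcd n d : Int) ∣ d := ⟨(Int.gcd n d : Int), (Int.ediv_mul_cancel hgd).symm⟩
  exact ⟨h1, by omega, h2, by omega, h5.trans (dvd_denP a d hd.1 hd.2)⟩

lemma phi_mem_frB (a : Int) (v : Int) (hv : v ∈ fA a) : phi (denP a) v ∈ frB a := by
  rcases (mem_fA a v).mp hv with ⟨d, hd, n, hn, rfl⟩
  rw [phi_reduce (denP a) n d hn.1 hd.1 (denP_pos a) (dvd_denP a d hd.1 hd.2)]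
  exact (mem_frB a _).mpr ⟨d, hd, n, hn, rfl⟩

lemma phi_inv (a : Int) (v : Int) (hv : v ∈ fA a) :
    v = (phi (denP a) v).1 * PySem.Int.floordiv (denP a) (phi (denP a) v).2 := by
  rcases (mem_fA a v).mp hv with ⟨d, hd, n, hn, rfl⟩
  rw [phi_reduce (denP a) n d hn.1 hd.1 (denP_pos a) (dvd_denP a d hd.1 hd.2)]
  have hden := denP_pos a
  have hdvd := dvd_denP a d hd.1 hd.2
  have hg0 : 0 < (Int.gcd n d : Int) := by
    have : ¬(n = 0 ∧ d = 0) := by omega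
    have := Int.gcd_eq_zero_iff (a := n) (b := d)
    omega
  have hgn : (Int.gcd n d : Int) ∣ n := Int.gcd_dvd_left n d
  have hgd : (Int.gcd n d : Int) ∣ d := Int.gcd_dvd_right n d
  have hm0 : PySem.Int.floordiv (denP a) d = denP a / d := PySem.Int.floordiv_eq_ediv_of_pos (by omega)
  set m := denP a / d with hm
  have hdm : d * m = denP a := Int.mul_ediv_cancel' hdvd
  have hmpos : 0 < m := by nlinarith
  have hq2 : 0 < d / (Int.gcd n d : Int) := by
    rw [Int.lt_ediv_iff_mul_lt hg0 hgd, zero_mul]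
    omega
  rw [PySem.Int.floordiv_eq_ediv_of_pos hg0, PySem.Int.floordiv_eq_ediv_of_pos hg0,
      PySem.Int.floordiv_eq_ediv_of_pos hq2, hm0]
  have hsplit : denP a = d / (Int.gcd n d : Int) * ((Int.gcd n d : Int) * m) := by
    rw [← mul_assoc, Int.ediv_mul_cancel hgd, hdm]
  rw [hsplit, Int.mul_ediv_cancel_left _ (by omega)]
  rw [← mul_assoc, Int.ediv_mul_cancel hgn]

lemma frB_mem_image (a : Int) (p : Int × Int) (hp : p ∈ frB a) :
    ∃ v ∈ fA a, phi (denP a) v = p := by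
  rcases (mem_frB a p).mp hp with ⟨d, hd, n, hn, rfl⟩
  exact ⟨n * PySem.Int.floordiv (denP a) d, (mem_fA a _).mpr ⟨d, hd, n, hn, rfl⟩,
    phi_reduce (denP a) n d hn.1 hd.1 (denP_pos a) (dvd_denP a d hd.1 hd.2)⟩

-- the scaled value determines the pair: v * p.2 = p.1 * denP
lemma value_rel (a : Int) (v : Int) (hv : v ∈ fA a) :
    v * (phi (denP a) v).2 = (phi (denP a) v).1 * denP a := by
  have h5 := frB_spec a _ (phi_mem_frB a v hv)
  have hinv := phi_inv a v hv
  have hdvd : (phi (denP a) v).2 ∣ denP a := h5.2.2.2.2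
  have h2 : 0 < (phi (denP a) v).2 := by omega
  have : PySem.Int.floordiv (denP a) (phi (denP a) v).2 * (phi (denP a) v).2 = denP a := by
    rw [PySem.Int.floordiv_eq_ediv_of_pos h2]
    exact Int.ediv_mul_cancel hdvd
  calc v * (phi (denP a) v).2
      = (phi (denP a) v).1 * (PySem.Int.floordiv (denP a) (phi (denP a) v).2 * (phi (denP a) v).2) := by
        rw [← mul_assoc, ← hinv]
    _ = (phi (denP a) v).1 * denP a := by rw [this]

-- strict order transfer: smaller scaled value means strictly smaller integer key
lemma key_mono (a : Int) (v w : Int) (hv : v ∈ fA a) (hw : w ∈ fA a) (hlt : v < w) :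
    PySem.Int.floordiv ((phi (denP a) v).1 * (a * a)) (phi (denP a) v).2 <
      PySem.Int.floordiv ((phi (denP a) w).1 * (a * a)) (phi (denP a) w).2 := by
  have hp := frB_spec a _ (phi_mem_frB a v hv)
  have hq := frB_spec a _ (phi_mem_frB a w hw)
  have hvr := value_rel a v hv
  have hwr := value_rel a w hw
  set p1 := (phi (denP a) v).1 with hp1
  set p2 := (phi (denP a) v).2 with hp2
  set q1 := (phi (denP a) w).1 with hq1
  set q2 := (phi (denP a) w).2 with hq2
  obtain ⟨hp11, hp1a, hp21, hp2a, -⟩ := hp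
  obtain ⟨hq11, hq1a, hq21, hq2a, -⟩ := hq
  have hden := denP_pos a
  have e2 : p1 * q2 * denP a < q1 * p2 * denP a := by
    calc p1 * q2 * denP a = (v * p2) * q2 := by rw [hvr]; ring
      _ < (w * q2) * p2 := by nlinarith [mul_lt_mul_of_pos_right hlt (mul_pos (show (0:Int) < p2 by omega) (show (0:Int) < q2 by omega))]
      _ = q1 * p2 * denP a := by rw [hwr]; ring
  have hx : p1 * q2 + 1 ≤ q1 * p2 := lt_of_mul_lt_mul_right e2 (le_of_lt hden)
  have hk : PySem.Int.floordiv (p1 * (a * a)) p2 * p2 ≤ p1 * (a * a) :=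
    (PySem.Int.le_floordiv_iff_mul_le (show (0:Int) < p2 by omega)).mp le_rfl
  rw [Int.lt_iff_add_one_le, PySem.Int.le_floordiv_iff_mul_le (show (0:Int) < q2 by omega)]
  set k := PySem.Int.floordiv (p1 * (a * a)) p2 with hkdef
  apply le_of_mul_le_mul_right _ (show (0:Int) < p2 by omega)
  nlinarith [mul_le_mul_of_nonneg_right hk (show (0:Int) ≤ q2 by omega),
    mul_le_mul hp2a hq2a (by omega) (by omega),
    mul_le_mul_of_nonneg_right hx (mul_nonneg (show (0:Int) ≤ a by omega) (show (0:Int) ≤ a by omega))]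

lemma main_eq (a : Int) :
    PySem.List.sorted (frB a) (fun p => PySem.Int.floordiv (p.1 * (a * a)) p.2) =
      (PySem.List.sorted (fA a) (fun x => x)).map (phi (denP a)) := by
  set SA := PySem.List.sorted (fA a) (fun x => x) with hSA
  have hperm : SA.Perm (fA a) := PySem.List.sorted_perm _ _ _
  have hmemSA : ∀ x : Int, x ∈ SA ↔ x ∈ fA a := fun x => hperm.mem_iff
  have hndA : SA.Nodup := hperm.nodup_iff.mpr (nodup_fA a)
  have hple : SA.Pairwise (fun x y => x ≤ y) := PySem.List.sorted_pairwise (fA a) (fun x => x)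
  have hplt : SA.Pairwise (fun x y => x < y) :=
    (hple.and hndA).imp (fun h => lt_of_le_of_ne h.1 h.2)
  have hL_nodup : (SA.map (phi (denP a))).Nodup := by
    refine List.Nodup.map_on ?_ hndA
    intro x hx y hy hxy
    have h1 := phi_inv a x ((hmemSA x).mp hx)
    have h2 := phi_inv a y ((hmemSA y).mp hy)
    rw [hxy] at h1
    rw [h1, ← h2]
  have hLperm : (SA.map (phi (denP a))).Perm (frB a) := by
    rw [List.perm_ext_iff_of_nodup hL_nodup (nodup_frB a)]
    intro p
    simp only [List.mem_map]
    constructor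
    · rintro ⟨v, hv, rfl⟩; exact phi_mem_frB a v ((hmemSA v).mp hv)
    · intro hp
      rcases frB_mem_image a p hp with ⟨v, hv, h⟩
      exact ⟨v, (hmemSA v).mpr hv, h⟩
  have hLpair : (SA.map (phi (denP a))).Pairwise
      (fun p q => PySem.Int.floordiv (p.1 * (a * a)) p.2 < PySem.Int.floordiv (q.1 * (a * a)) q.2) := by
    rw [List.pairwise_map]
    exact List.Pairwise.imp_of_mem
      (fun hx hy h => key_mono a _ _ ((hmemSA _).mp hx) ((hmemSA _).mp hy) h) hplt
  exact PySem.List.sorted_eq_of_perm_of_pairwise_lt _ _ _ hLperm hLpair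

-- ===== VERDICT (by name: the statement is the Claim_ definition above) =====
theorem uniquefractiongenerator_spec : Claim_equal_uniquefractiongenerator := by
  intro a _
  unfold Spec_uniquefractiongenerator
  rw [portA_eq, portB_eq, main_eq, List.map_map]
  rfl
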